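-- pv_equiv track=rewrite | github.com/remy-guillermin/rpg-bot | utils/builder_graphic.py | _sort_radar
-- ===== SOURCE A (Python) =====
-- def _sort_radar(stats_dict):
--     """Max haut-droite, min bas-gauche, décroissance symétrique."""
--     sorted_items = sorted(
--         stats_dict.items(), key=lambda x: x[1], reverse=True
--     )
--     N = len(sorted_items)
--     positions = [None] * N
--     left, right = 0, N - 1
--     for i, item in enumerate(sorted_items):
--         if i % 2 == 0:
--             positions[left]  = item; left  += 1
--         else:
--             positions[right] = item; right -= 1
--     return [x[0] for x in positions], [x[1] for x in positions]
-- ===== SOURCE B (Python) =====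
-- def _sort_radar(stats_dict):
--     """Max haut-droite, min bas-gauche, décroissance symétrique."""
--     sorted_items = sorted(stats_dict.items(), key=lambda x: x[1], reverse=True)
--     ordered = sorted_items[0::2] + sorted_items[1::2][::-1]
--     return [k for k, _ in ordered], [v for _, v in ordered]
-- ===== Notes on version B (the rewrite author's own statement) =====
-- stated objective: simpler
-- what changed: Replaces the two-pointer fill into a preallocated positions array (index parity test, left/right cursors) by a direct parity split of the sorted list: even-ranked items in order followed by odd-ranked items reversed, then unzip.
import Mathlib
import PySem

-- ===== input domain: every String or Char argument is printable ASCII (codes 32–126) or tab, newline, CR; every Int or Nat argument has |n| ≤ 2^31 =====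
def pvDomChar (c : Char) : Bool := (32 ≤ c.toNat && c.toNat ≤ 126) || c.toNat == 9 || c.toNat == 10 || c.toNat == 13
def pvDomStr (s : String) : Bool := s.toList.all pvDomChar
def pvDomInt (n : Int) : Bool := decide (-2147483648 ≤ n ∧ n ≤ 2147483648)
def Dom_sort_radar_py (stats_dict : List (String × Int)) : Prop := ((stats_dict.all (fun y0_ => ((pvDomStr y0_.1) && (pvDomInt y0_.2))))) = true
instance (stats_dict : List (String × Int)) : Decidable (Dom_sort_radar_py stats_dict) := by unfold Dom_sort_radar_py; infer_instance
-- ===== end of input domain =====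

-- B replaces A's two-pointer fill of a preallocated positions array by a parity split of the
-- sorted list (even-ranked items, then odd-ranked items reversed); objective: simpler.

-- ===== PORT A =====
-- loop body of A's 'for i, item in enumerate(sorted_items)': state = (positions, left, right)
def radarStep (st : List (Option (String × Int)) × Int × Int) (p : Int × (String × Int)) :
    List (Option (String × Int)) × Int × Int :=
  if p.1 % 2 == 0 then (st.1.set st.2.1.toNat (some p.2), st.2.1 + 1, st.2.2)
  else (st.1.set st.2.2.toNat (some p.2), st.2.1, st.2.2 - 1)

def sort_radar_py (stats_dict : List (String × Int)) : List String × List Int :=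
  let sorted_items := PySem.List.sorted stats_dict (fun x => x.2) true
  let N : Int := sorted_items.length
  let positions : List (Option (String × Int)) := List.replicate sorted_items.length none  -- [None] * N
  let fin := (PySem.List.enumerate sorted_items 0).foldl radarStep (positions, 0, N - 1)
  -- x[0] / x[1]: the loop fills every slot, so each entry is 'some'; getD's default is unreachable
  (fin.1.map (fun o => (o.getD ("", 0)).1), fin.1.map (fun o => (o.getD ("", 0)).2))

-- ===== PORT B =====
def sort_radar_py_alt (stats_dict : List (String × Int)) : List String × List Int :=
  let sorted_items := PySem.List.sorted stats_dict (fun x => x.2) true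
  -- ordered = sorted_items[0::2] + sorted_items[1::2][::-1]   (step slices never raise: getD's
  -- none branch is unreachable since the step is the nonzero literal 2 resp. -1)
  let ordered := ((PySem.List.slice? sorted_items (some 0) none 2).getD [])
      ++ ((PySem.List.slice? ((PySem.List.slice? sorted_items (some 1) none 2).getD []) none none (-1)).getD [])
  (ordered.map (fun p => p.1), ordered.map (fun p => p.2))

-- ===== PRECONDITION & SPEC =====
def Spec_sort_radar_py (stats_dict : List (String × Int)) (out : List String × List Int) : Prop := out = sort_radar_py_alt stats_dict
instance (stats_dict : List (String × Int)) (out : List String × List Int) : Decidable (Spec_sort_radar_py stats_dict out) := by unfold Spec_sort_radar_py; infer_instance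

-- ===== CLAIM (what is proved, stated in full; the proofs are below) =====
def Claim_equal_sort_radar_py : Prop := ∀ (stats_dict : List (String × Int)), Dom_sort_radar_py stats_dict → Spec_sort_radar_py stats_dict (sort_radar_py stats_dict)

-- ===== LEMMAS AND PROOFS =====

-- elements at even / odd ranks
def evensL {α : Type} : List α → List α
  | [] => []
  | [x] => [x]
  | x :: _ :: xs => x :: evensL xs

def oddsL {α : Type} : List α → List α
  | [] => []
  | [_] => []
  | _ :: y :: xs => y :: oddsL xs

-- abstract alternating placement: flag false = next element goes to the front, true = to the back
def altf {α : Type} : Bool → List α → List α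
  | _, [] => []
  | b, x :: xs => if b then altf (!b) xs ++ [x] else x :: altf (!b) xs

theorem cons_evens_odds {α : Type} (xs : List α) :
    (∀ x : α, evensL (x :: xs) = x :: oddsL xs) ∧ (∀ x : α, oddsL (x :: xs) = evensL xs) := by
  induction xs using evensL.induct with
  | case1 => simp [evensL, oddsL]
  | case2 y => simp [evensL, oddsL]
  | case3 y z zs ih =>
    refine ⟨fun x => ?_, fun x => ?_⟩
    · simp [evensL, oddsL, ih.1 z]
    · simp [evensL, oddsL, ih.2 z]

theorem altf_eq {α : Type} (xs : List α) :
    altf false xs = evensL xs ++ (oddsL xs).reverse ∧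
    altf true xs = oddsL xs ++ (evensL xs).reverse := by
  induction xs with
  | nil => simp [altf, evensL, oddsL]
  | cons x xs ih =>
    constructor
    · simp [altf, ih.2, (cons_evens_odds xs).1 x, (cons_evens_odds xs).2 x]
    · simp [altf, ih.1, (cons_evens_odds xs).1 x, (cons_evens_odds xs).2 x]

theorem set_front {α : Type} (E R : List α) (a d : α) (m : Nat) :
    (E ++ (List.replicate (m + 1) d ++ R)).set E.length a
      = (E ++ [a]) ++ (List.replicate m d ++ R) := by
  induction E with
  | nil => simp [List.replicate_succ]
  | cons e E ih => simpa using ih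

theorem set_rep {α : Type} (R : List α) (a d : α) (m : Nat) :
    (List.replicate (m + 1) d ++ R).set m a = List.replicate m d ++ (a :: R) := by
  induction m with
  | zero => simp [List.replicate_succ]
  | succ m ih => simpa [List.replicate_succ] using ih

theorem set_back {α : Type} (E R : List α) (a d : α) (m : Nat) :
    (E ++ (List.replicate (m + 1) d ++ R)).set (E.length + m) a
      = E ++ (List.replicate m d ++ (a :: R)) := by
  induction E with
  | nil => simpa using set_rep R a d m
  | cons e E ih =>
    have hlen : (e :: E).length + m = (E.length + m) + 1 := by simp; omega
    rw [hlen]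
    simpa using ih

theorem loop_inv (xs : List (String × Int)) (k : Nat) (E R : List (Option (String × Int))) :
    ((PySem.List.enumerate xs (k : Int)).foldl radarStep
        (E ++ (List.replicate xs.length none ++ R), (E.length : Int),
          (E.length : Int) + xs.length - 1)).1
      = E ++ ((altf (k % 2 == 1) xs).map some ++ R) := by
  induction xs generalizing k E R with
  | nil => simp [PySem.List.enumerate, altf]
  | cons x xs ih =>
    rw [PySem.List.enumerate_cons, List.foldl_cons]
    by_cases hk : k % 2 = 0
    · have hki : (((k : Int) % 2 == 0) : Bool) = true := by simp; omega
      have hkb : ((k % 2 == 1) : Bool) = false := by simp [hk]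
      have hkb1 : (((k + 1) % 2 == 1) : Bool) = true := by simp; omega
      simp only [radarStep, hki, if_true, List.length_cons]
      rw [show ((E.length : Int)).toNat = E.length by simp]
      rw [set_front]
      have h1 : (E.length : Int) + 1 = (((E ++ [some x]).length : Nat) : Int) := by
        simp
      have h2 : (E.length : Int) + ((xs.length + 1 : Nat) : Int) - 1
          = (((E ++ [some x]).length : Nat) : Int) + (xs.length : Int) - 1 := by
        simp only [List.length_append, List.length_cons, List.length_nil]
        push_cast; omega
      rw [h1, h2, show ((k : Int) + 1) = (((k + 1 : Nat) : Int)) by push_cast; omega]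
      rw [ih (k + 1) (E ++ [some x]) R]
      simp [altf, hkb, hkb1]
    · have hki : (((k : Int) % 2 == 0) : Bool) = false := by simp; omega
      have hkb : ((k % 2 == 1) : Bool) = true := by simp; omega
      have hkb1 : (((k + 1) % 2 == 1) : Bool) = false := by simp; omega
      simp only [radarStep, hki, Bool.false_eq_true, if_false, List.length_cons]
      have hidx : ((E.length : Int) + ((xs.length + 1 : Nat) : Int) - 1).toNat
          = E.length + xs.length := by push_cast; omega
      rw [hidx, set_back]
      have h2 : (E.length : Int) + ((xs.length + 1 : Nat) : Int) - 1 - 1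
          = (E.length : Int) + (xs.length : Int) - 1 := by push_cast; omega
      rw [h2, show ((k : Int) + 1) = (((k + 1 : Nat) : Int)) by push_cast; omega]
      rw [ih (k + 1) E (some x :: R)]
      simp [altf, hkb, hkb1]

theorem F0 {α : Type} (xs : List α) :
    (List.range ((xs.length + 1) / 2)).filterMap
        (fun (k : Nat) => xs[(2 * (k : Int)).toNat]?) = evensL xs := by
  induction xs using evensL.induct with
  | case1 => simp [evensL]
  | case2 x => simp [evensL]
  | case3 x y ys ih =>
    have hc : ((x :: y :: ys).length + 1) / 2 = (ys.length + 1) / 2 + 1 := by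
      simp; omega
    rw [hc, List.range_succ_eq_map, List.filterMap_cons]
    have h0 : ((2 * ((0 : Nat) : Int)).toNat) = 0 := by norm_num
    rw [List.filterMap_map]
    have hfun : ((fun (k : Nat) => (x :: y :: ys)[(2 * (k : Int)).toNat]?) ∘ Nat.succ)
        = fun (k : Nat) => ys[(2 * (k : Int)).toNat]? := by
      funext k
      have h2 : (2 * ((k.succ : Nat) : Int)).toNat = (2 * (k : Int)).toNat + 2 := by
        push_cast; omega
      simp only [Function.comp, h2]
      simp
    rw [hfun, ih]
    simp [evensL]

theorem slice?_zero_two {α : Type} (xs : List α) :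
    PySem.List.slice? xs (some 0) none 2 = some (evensL xs) := by
  simp only [PySem.List.slice?, PySem.List.sliceIndices]
  norm_num
  have hcount : (if 0 < xs.length then (((xs.length : Int) + 2 - 1) / 2).toNat else 0)
      = (xs.length + 1) / 2 := by split_ifs <;> omega
  rw [hcount]
  exact F0 xs

theorem slice?_one_two {α : Type} (xs : List α) :
    PySem.List.slice? xs (some 1) none 2 = some (oddsL xs) := by
  cases xs with
  | nil => simp [PySem.List.slice?, PySem.List.sliceIndices, oddsL]
  | cons x t =>
    simp only [PySem.List.slice?, PySem.List.sliceIndices]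
    norm_num
    have hcount : (if 0 < t.length then (((t.length : Int) + 2 - 1) / 2).toNat else 0)
        = (t.length + 1) / 2 := by
      split_ifs <;> omega
    rw [hcount]
    have hfun : (fun (k : Nat) => (x :: t)[((1 : Int) + 2 * (k : Int)).toNat]?)
        = fun (k : Nat) => t[(2 * (k : Int)).toNat]? := by
      funext k
      have h1 : ((1 : Int) + 2 * (k : Int)).toNat = (2 * (k : Int)).toNat + 1 := by
        omega
      simp [h1]
    rw [hfun, F0 t, (cons_evens_odds t).2 x]

theorem main_eq (xs : List (String × Int)) : sort_radar_py xs = sort_radar_py_alt xs := by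
  unfold sort_radar_py sort_radar_py_alt
  have h := loop_inv (PySem.List.sorted xs (fun x => x.2) true) 0 [] []
  simp only [List.nil_append, List.append_nil, List.length_nil, Nat.cast_zero, zero_add,
    Nat.zero_mod, Nat.reduceBEq] at h
  simp only [slice?_zero_two, slice?_one_two, PySem.List.slice?_none_none_neg_one,
    Option.getD_some]
  rw [h]
  simp [List.map_map, Function.comp_def, (altf_eq _).1]

-- ===== VERDICT (by name: the statement is the Claim_ definition above) =====
theorem sort_radar_py_spec : Claim_equal_sort_radar_py := by
  intro xs _
  unfold Spec_sort_radar_py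
  exact main_eq xs
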